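-- pv_equiv track=rewrite | github.com/MrBrantCode/unitest_baseline | mut_generate/mist_train_cf/cf_12292/solution.py | max_money
-- ===== SOURCE A (Python) =====
-- def max_money(A, B):
--     """
--     Compute the maximum amount of money X that can be obtained using only coins of denomination A and B.
--
--     Parameters:
--     A (int): The denomination of the first coin.
--     B (int): The denomination of the second coin.
--
--     Returns:
--     int: The maximum amount of money X that can be obtained.
--     """
--     max_value = 79
--     max_X = 0
--     for i in range(max_value // A + 1):
--         for j in range(max_value // B + 1):
--             X = A * i + B * j
--             if X <= max_value and X > max_X:
--                 max_X = X
--     return max_X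
-- ===== SOURCE B (Python) =====
-- def max_money(A, B):
--     """Closed-form inner step: for each count i of A-coins, the best number of
--     B-coins is (max_value - A*i) // B, so the inner loop disappears.
--     Non-positive denominations yield 0 (the original's ranges are empty there)."""
--     max_value = 79
--     if A <= 0 or B <= 0:
--         return 0
--     max_X = 0
--     for i in range(max_value // A + 1):
--         X = A * i + B * ((max_value - A * i) // B)
--         if X > max_X:
--             max_X = X
--     return max_X
-- ===== Notes on version B (the rewrite author's own statement) =====
-- stated objective: simpler
-- what changed: The inner loop over j is replaced by a closed-form floor-division choice of the number of B-coins per i, and non-positive denominations return 0 directly instead of via empty ranges.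
import Mathlib
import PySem

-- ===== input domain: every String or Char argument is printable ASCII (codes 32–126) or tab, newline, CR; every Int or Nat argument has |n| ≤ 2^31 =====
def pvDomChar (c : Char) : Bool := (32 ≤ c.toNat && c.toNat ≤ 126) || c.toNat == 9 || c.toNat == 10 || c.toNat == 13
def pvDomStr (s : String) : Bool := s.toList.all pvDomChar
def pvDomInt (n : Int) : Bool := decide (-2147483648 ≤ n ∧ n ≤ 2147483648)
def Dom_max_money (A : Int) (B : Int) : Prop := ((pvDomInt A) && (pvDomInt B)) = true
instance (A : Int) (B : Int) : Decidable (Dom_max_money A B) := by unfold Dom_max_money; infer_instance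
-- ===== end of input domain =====

-- B replaces A's inner loop over j by the closed-form best j = (79 - A*i) // B (simpler, one loop);
-- return-value equivalence on all inputs where the Python A returns (Pre_ excludes its ZeroDivisionErrors).

-- ===== PORT A =====
-- the temporary X = A*i + B*j is inlined
def max_money (A : Int) (B : Int) : Int :=
  (PySem.List.pyRange 0 (PySem.Int.floordiv 79 A + 1) 1).foldl
    (fun max_X i =>
      (PySem.List.pyRange 0 (PySem.Int.floordiv 79 B + 1) 1).foldl
        (fun max_X j =>
          if A * i + B * j ≤ 79 ∧ A * i + B * j > max_X then A * i + B * j else max_X)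
        max_X)
    0

-- ===== PORT B =====
-- the temporary X = A*i + B*((79 - A*i)//B) is inlined
def max_money_alt (A : Int) (B : Int) : Int :=
  if A ≤ 0 ∨ B ≤ 0 then 0
  else
    (PySem.List.pyRange 0 (PySem.Int.floordiv 79 A + 1) 1).foldl
      (fun max_X i =>
        if A * i + B * PySem.Int.floordiv (79 - A * i) B > max_X
        then A * i + B * PySem.Int.floordiv (79 - A * i) B else max_X)
      0

-- ===== PRECONDITION & SPEC =====
-- Pre_ excludes exactly the inputs where A raises ZeroDivisionError: A = 0, or A > 0 with B = 0.
def Pre_max_money (A : Int) (B : Int) : Prop := A ≠ 0 ∧ (0 < A → B ≠ 0)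
instance (A : Int) (B : Int) : Decidable (Pre_max_money A B) := by unfold Pre_max_money; infer_instance
def pvWitness_max_money : Int × Int := (2, 5)

def Spec_max_money (A : Int) (B : Int) (out : Int) : Prop := out = max_money_alt A B
instance (A : Int) (B : Int) (out : Int) : Decidable (Spec_max_money A B out) := by unfold Spec_max_money; infer_instance

-- ===== CLAIM (what is proved, stated in full; the proofs are below) =====
def Claim_equal_max_money : Prop := ∀ (A : Int) (B : Int), Dom_max_money A B → Pre_max_money A B → Spec_max_money A B (max_money A B)

-- ===== LEMMAS AND PROOFS =====

-- a fold that never changes its accumulator returns the initial value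
theorem pv_foldl_id (l : List Int) (init : Int) : l.foldl (fun acc _ => acc) init = init := by
  induction l generalizing init with
  | nil => rfl
  | cons x xs ih => simp [ih init]

-- 79 // b ≤ -1 for negative b (so A's ranges are empty there)
theorem pv_floordiv79_neg {b : Int} (hb : b < 0) : PySem.Int.floordiv 79 b ≤ -1 := by
  have h := PySem.Int.floordiv_mul_add_mod 79 b
  have hm := (PySem.Int.mod_neg_bounds 79 hb).2
  by_contra hq
  have hq0 : 0 ≤ PySem.Int.floordiv 79 b := by omega
  have : PySem.Int.floordiv 79 b * b ≤ 0 := mul_nonpos_of_nonneg_of_nonpos hq0 hb.le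
  omega

theorem pv_step (X acc : Int) (h79 : X ≤ 79) :
    (if X ≤ 79 ∧ X > acc then X else acc) = max acc X := by
  rw [max_def]; split_ifs <;> omega

theorem pv_maxstep (X acc : Int) : (if X > acc then X else acc) = max acc X := by
  rw [max_def]; split_ifs <;> omega

-- A's inner loop, characterised: over range(0,k) with threshold js it computes max m (S + B*js)
-- (until j reaches js the running max is S + B*j; beyond js the guard X ≤ 79 fails)
theorem pv_fold_upto (B S m js : Int) (hB : 0 < B) (hjs0 : 0 ≤ js)
    (hle : S + B * js ≤ 79) (hgt : 79 < S + B * (js + 1)) (k : Nat) :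
    (PySem.List.pyRange 0 (k : Int) 1).foldl
      (fun max_X j => if S + B * j ≤ 79 ∧ S + B * j > max_X then S + B * j else max_X) m
    = if (k : Int) = 0 then m
      else if (k : Int) ≤ js + 1 then max m (S + B * ((k : Int) - 1))
      else max m (S + B * js) := by
  induction k with
  | zero => simp
  | succ k ih =>
    have hsplit : PySem.List.pyRange 0 (((k+1 : Nat)) : Int) 1
        = PySem.List.pyRange 0 (k:Int) 1 ++ [(k:Int)] := by
      push_cast
      exact PySem.List.pyRange_one_succ_right (by positivity)
    rw [hsplit, List.foldl_append, ih]
    simp only [List.foldl_cons, List.foldl_nil]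
    have hcast : ((k+1 : Nat) : Int) = (k : Int) + 1 := by push_cast; ring
    rw [hcast, if_neg (by omega : ¬ ((k:Int) + 1) = 0)]
    have hone : (k : Int) + 1 - 1 = (k : Int) := by ring
    by_cases hk0 : (k : Int) = 0
    · rw [if_pos hk0, if_pos (by omega : (k:Int) + 1 ≤ js + 1), hone]
      have hBk : B * (k : Int) = 0 := by rw [hk0, mul_zero]
      have hXk : S + B * (k : Int) ≤ 79 := by
        have := mul_nonneg hB.le hjs0
        linarith
      rw [pv_step _ _ hXk]
    · rw [if_neg hk0]
      rcases le_or_gt ((k : Int)) js with hk | hk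
      · have hXk : S + B * (k : Int) ≤ 79 := by
          have := mul_le_mul_of_nonneg_left hk hB.le
          linarith
        rw [if_pos (by omega : (k:Int) ≤ js + 1),
            if_pos (by omega : (k:Int) + 1 ≤ js + 1), hone, pv_step _ _ hXk]
        have hmono : S + B * ((k : Int) - 1) ≤ S + B * (k : Int) := by
          have := mul_le_mul_of_nonneg_left (by linarith : (k:Int) - 1 ≤ (k:Int)) hB.le
          linarith
        rw [max_assoc, max_eq_right hmono]
      · have hXk : 79 < S + B * (k : Int) := by
          have := mul_le_mul_of_nonneg_left (by linarith : js + 1 ≤ (k:Int)) hB.le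
          linarith
        rw [if_neg (fun h => absurd h.1 (by linarith)), if_neg (by omega : ¬ ((k:Int) + 1 ≤ js + 1))]
        by_cases hkb : (k : Int) ≤ js + 1
        · rw [if_pos hkb, (by omega : (k : Int) - 1 = js)]
        · rw [if_neg hkb]

-- A's inner loop equals B's closed-form step, for 0 ≤ S ≤ 79 and B > 0
theorem pv_inner (B S m : Int) (hB : 0 < B) (hS0 : 0 ≤ S) (hS : S ≤ 79) :
    (PySem.List.pyRange 0 (PySem.Int.floordiv 79 B + 1) 1).foldl
      (fun max_X j => if S + B * j ≤ 79 ∧ S + B * j > max_X then S + B * j else max_X) m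
    = if S + B * PySem.Int.floordiv (79 - S) B > m
      then S + B * PySem.Int.floordiv (79 - S) B else m := by
  set js := PySem.Int.floordiv (79 - S) B with hjs
  set t := PySem.Int.floordiv 79 B with ht
  have h1 := PySem.Int.floordiv_mul_add_mod (79 - S) B
  have hm1 : 0 ≤ PySem.Int.mod (79 - S) B := PySem.Int.mod_nonneg (79 - S) hB
  have hm1' : PySem.Int.mod (79 - S) B < B := PySem.Int.mod_lt (79 - S) hB
  have h2 := PySem.Int.floordiv_mul_add_mod 79 B
  have hm2 : 0 ≤ PySem.Int.mod 79 B := PySem.Int.mod_nonneg 79 hB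
  have hm2' : PySem.Int.mod 79 B < B := PySem.Int.mod_lt 79 hB
  rw [← hjs] at h1
  rw [← ht] at h2
  have hjs0 : 0 ≤ js := by nlinarith
  have ht0 : 0 ≤ t := by nlinarith
  have hle : S + B * js ≤ 79 := by nlinarith [mul_comm B js]
  have hgt : 79 < S + B * (js + 1) := by nlinarith [mul_comm B js]
  have hjt : js ≤ t := by nlinarith
  have hk : (((t + 1).toNat : Nat) : Int) = t + 1 := Int.toNat_of_nonneg (by omega)
  rw [show t + 1 = (((t + 1).toNat : Nat) : Int) from hk.symm]
  rw [pv_fold_upto B S m js hB hjs0 hle hgt]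
  rw [hk, pv_maxstep]
  rw [if_neg (by omega : ¬ (t + 1 : Int) = 0)]
  by_cases htb : t + 1 ≤ js + 1
  · rw [if_pos htb]
    have hts : t = js := by omega
    rw [hts]
    ring_nf
  · rw [if_neg htb]

-- ===== VERDICT (by name: the statement is the Claim_ definition above) =====
theorem max_money_spec : Claim_equal_max_money := by
  intro A B _ hpre
  obtain ⟨hA0, hAB⟩ := hpre
  unfold Spec_max_money max_money max_money_alt
  by_cases hApos : 0 < A
  · have hB0 : B ≠ 0 := hAB hApos
    by_cases hBpos : 0 < B
    · -- main case: A > 0, B > 0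
      rw [if_neg (by omega : ¬ (A ≤ 0 ∨ B ≤ 0))]
      apply PySem.List.foldl_congr_mem
      intro acc i hi
      obtain ⟨hi0, hilt⟩ := (PySem.List.mem_pyRange_one).1 hi
      have h2 := PySem.Int.floordiv_mul_add_mod 79 A
      have hm2 : 0 ≤ PySem.Int.mod 79 A := PySem.Int.mod_nonneg 79 hApos
      have hit : i ≤ PySem.Int.floordiv 79 A := by omega
      have hS0 : 0 ≤ A * i := mul_nonneg hApos.le hi0
      have hS : A * i ≤ 79 := by nlinarith
      exact pv_inner B (A * i) acc hBpos hS0 hS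
    · -- A > 0, B < 0: all inner ranges of A are empty, B's guard returns 0
      have hBneg : B < 0 := by omega
      rw [if_pos (Or.inr (by omega))]
      have hnil : PySem.List.pyRange 0 (PySem.Int.floordiv 79 B + 1) 1 = [] :=
        PySem.List.pyRange_one_eq_nil (by have := pv_floordiv79_neg hBneg; omega)
      simp only [hnil, List.foldl_nil]
      exact pv_foldl_id _ 0
  · -- A < 0: A's outer range is empty, B's guard returns 0
    have hAneg : A < 0 := by omega
    rw [if_pos (Or.inl (by omega))]
    rw [show PySem.List.pyRange 0 (PySem.Int.floordiv 79 A + 1) 1 = [] from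
      PySem.List.pyRange_one_eq_nil (by have := pv_floordiv79_neg hAneg; omega)]
    rfl
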